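-- pv_equiv track=rewrite | github.com/Benja-Pauls/portfolio-pulse | generate_issue.py | parse_opus_cards
-- ===== SOURCE A (Python) =====
-- def parse_opus_cards(text):
--     """Parse Claude's response into HTML cards."""
--     if not text:
--         return ""
--
--     cards = []
--     current_title = None
--     current_body = []
--
--     for line in text.strip().split("\n"):
--         line = line.strip().lstrip("*").rstrip("*").strip()
--         if not line or line == "---":
--             continue
--         if line.upper().startswith("TITLE:"):
--             if current_title:
--                 cards.append((current_title, " ".join(current_body)))
--             current_title = line[6:].strip().lstrip("*").rstrip("*").strip()
--             current_body = []
--         elif line.upper().startswith("BODY:"):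
--             current_body.append(line[5:].strip())
--         elif current_title and not line.upper().startswith("DAILY") and len(line) > 10:
--             current_body.append(line)
--
--     if current_title:
--         cards.append((current_title, " ".join(current_body)))
--
--     colors = ["#6366f1", "#10b981", "#f59e0b", "#ef4444", "#8b5cf6", "#06b6d4"]
--     html = ""
--     for i, (title, body) in enumerate(cards):
--         color = colors[i % len(colors)]
--         html += f'''
--         <div class="analysis-card" style="--accent: {color};">
--           <div class="analysis-card-inner">
--             <div class="analysis-quote-mark" style="color: {color};">\u201c</div>
--             <h3 class="analysis-card-title">{title}</h3>
--             <p class="analysis-card-body">{body}</p>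
--           </div>
--         </div>'''
--
--     return html
-- ===== SOURCE B (Python) =====
-- # B: group-first decomposition — normalize+filter all lines, drop the pre-TITLE prefix,
-- # cut the rest into (title-line, content) sections, map each section to a card, render.
-- _COLORS = ["#6366f1", "#10b981", "#f59e0b", "#ef4444", "#8b5cf6", "#06b6d4"]
--
-- def _norm(line):
--     return line.strip().lstrip("*").rstrip("*").strip()
--
-- def _is_title(line):
--     return line.upper().startswith("TITLE:")
--
-- def _sections(lines):
--     """Cut lines (starting with a TITLE line) into (title_line, content_lines) groups."""
--     secs = []
--     i, n = 0, len(lines)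
--     while i < n:
--         j = i + 1
--         while j < n and not _is_title(lines[j]):
--             j += 1
--         secs.append((lines[i], lines[i + 1:j]))
--         i = j
--     return secs
--
-- def _card(title_line, content):
--     title = _norm(title_line[6:])
--     body = [l[5:].strip() if l.upper().startswith("BODY:") else l
--             for l in content
--             if l.upper().startswith("BODY:")
--             or (title and not l.upper().startswith("DAILY") and len(l) > 10)]
--     return (title, " ".join(body))
--
-- def _render(i, title, body):
--     color = _COLORS[i % len(_COLORS)]
--     return f'''
--         <div class="analysis-card" style="--accent: {color};">
--           <div class="analysis-card-inner">
--             <div class="analysis-quote-mark" style="color: {color};">\u201c</div>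
--             <h3 class="analysis-card-title">{title}</h3>
--             <p class="analysis-card-body">{body}</p>
--           </div>
--         </div>'''
--
-- def parse_opus_cards(text):
--     lines = [_norm(l) for l in text.strip().split("\n")]
--     lines = [l for l in lines if l and l != "---"]
--     start = next((i for i, l in enumerate(lines) if _is_title(l)), len(lines))
--     cards = [_card(t, c) for t, c in _sections(lines[start:])]
--     cards = [(t, b) for t, b in cards if t]
--     return "".join(_render(i, t, b) for i, (t, b) in enumerate(cards))
-- ===== Notes on version B (the rewrite author's own statement) =====
-- stated objective: alternative
-- what changed: B replaces A's single running-accumulator loop with explicit flushes by a group-first pipeline: normalize and filter all lines, drop the pre-TITLE prefix, cut the rest into (title, content) sections with an index-scanning grouper, map each section to a card, and render the cards with a join over enumerate.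
import Mathlib
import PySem

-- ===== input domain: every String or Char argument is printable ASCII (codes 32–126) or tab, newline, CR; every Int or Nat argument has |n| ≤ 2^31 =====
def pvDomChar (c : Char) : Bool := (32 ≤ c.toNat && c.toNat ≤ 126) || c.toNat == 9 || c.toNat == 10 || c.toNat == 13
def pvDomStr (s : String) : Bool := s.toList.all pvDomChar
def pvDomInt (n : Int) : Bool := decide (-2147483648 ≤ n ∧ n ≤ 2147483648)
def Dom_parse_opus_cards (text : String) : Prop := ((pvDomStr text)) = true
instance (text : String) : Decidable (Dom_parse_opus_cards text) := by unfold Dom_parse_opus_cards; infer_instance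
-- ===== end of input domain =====

-- B re-groups the lines into (title, content) sections first and then maps them to cards,
-- instead of A's running-accumulator-with-flush; objective: alternative decomposition, same cost.

-- ===== shared literals and character-level helpers (both Pythons contain the same literals) =====
def pvColors : List (List Char) :=
  ["#6366f1".toList, "#10b981".toList, "#f59e0b".toList, "#ef4444".toList, "#8b5cf6".toList, "#06b6d4".toList]

-- the f-string template shared by both programs
def pvTpl (color title body : List Char) : List Char :=
  "\n        <div class=\"analysis-card\" style=\"--accent: ".toList ++ color ++
  ";\">\n          <div class=\"analysis-card-inner\">\n            <div class=\"analysis-quote-mark\" style=\"color: ".toList ++ color ++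
  ";\">\u201c</div>\n            <h3 class=\"analysis-card-title\">".toList ++ title ++
  "</h3>\n            <p class=\"analysis-card-body\">".toList ++ body ++
  "</p>\n          </div>\n        </div>".toList

-- exact: s.lstrip("*") drops leading '*' characters
def pvLstripStar (cs : List Char) : List Char := cs.dropWhile (· == '*')
-- exact: s.rstrip("*") drops trailing '*' characters
def pvRstripStar (cs : List Char) : List Char := (cs.reverse.dropWhile (· == '*')).reverse

-- ===== PORT A =====
-- A's loop state: (cards, current_title (None = none; '' falsy), current_body)
abbrev pvStateA := List (List Char × List Char) × Option (List Char) × List (List Char)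

-- the 'if current_title: cards.append((current_title, " ".join(current_body)))' block A repeats twice
def pvFlushA (cards : List (List Char × List Char)) (t : Option (List Char))
    (body : List (List Char)) : List (List Char × List Char) :=
  match t with
  | some ct => if ct ≠ [] then cards ++ [(ct, PySem.Chars.join " ".toList body)] else cards
  | none => cards

-- the body of A's 'for line in text.strip().split("\n")' loop
def pvStepA (s : pvStateA) (raw : List Char) : pvStateA :=
  let line := PySem.Chars.strip (pvRstripStar (pvLstripStar (PySem.Chars.strip raw)))
  if line = [] ∨ line = "---".toList then s
  else if PySem.Chars.startswith (PySem.Chars.upper line) "TITLE:".toList then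
    (pvFlushA s.1 s.2.1 s.2.2,
     some (PySem.Chars.strip (pvRstripStar (pvLstripStar (PySem.Chars.strip (PySem.List.slice line (some 6) none))))),
     [])
  else if PySem.Chars.startswith (PySem.Chars.upper line) "BODY:".toList then
    (s.1, s.2.1, s.2.2 ++ [PySem.Chars.strip (PySem.List.slice line (some 5) none)])
  else
    match s.2.1 with
    | some ct =>
        if ct ≠ [] ∧ ¬ (PySem.Chars.startswith (PySem.Chars.upper line) "DAILY".toList = true) ∧ 10 < line.length
        then (s.1, s.2.1, s.2.2 ++ [line]) else s
    | none => s

def parse_opus_cards (text : String) : String :=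
  if text.toList = [] then ""   -- 'if not text: return ""'
  else
    let st := (PySem.Chars.splitOn (PySem.Chars.strip text.toList) "\n".toList).foldl pvStepA ([], none, [])
    let cards := pvFlushA st.1 st.2.1 st.2.2
    -- 'for i, (title, body) in enumerate(cards): html += f...'
    String.ofList ((PySem.List.enumerate cards).foldl
      (fun html ic =>
        html ++ pvTpl ((PySem.List.pyGet? pvColors (PySem.Int.mod ic.1 (pvColors.length : Int))).getD [])
                  ic.2.1 ic.2.2) [])

-- ===== PORT B =====
def pvNormB (l : List Char) : List Char :=
  PySem.Chars.strip (pvRstripStar (pvLstripStar (PySem.Chars.strip l)))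

def pvIsTitle (l : List Char) : Bool := PySem.Chars.startswith (PySem.Chars.upper l) "TITLE:".toList
def pvIsBody (l : List Char) : Bool := PySem.Chars.startswith (PySem.Chars.upper l) "BODY:".toList
def pvIsDaily (l : List Char) : Bool := PySem.Chars.startswith (PySem.Chars.upper l) "DAILY".toList

-- one element of _card's list comprehension (some piece = line kept)
def pvPiece (title l : List Char) : Option (List Char) :=
  if pvIsBody l then some (PySem.Chars.strip (PySem.List.slice l (some 5) none))
  else if title ≠ [] ∧ ¬ (pvIsDaily l = true) ∧ 10 < l.length then some l else none

def pvCardB (tl : List Char) (content : List (List Char)) : List Char × List Char :=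
  let title := pvNormB (PySem.List.slice tl (some 6) none)
  (title, PySem.Chars.join " ".toList (content.filterMap (pvPiece title)))

-- _sections: the outer while appends (lines[i], lines[i+1:j]) with j the next TITLE index,
-- i.e. content = takeWhile non-title of the tail, and continues at lines[j:] = dropWhile non-title
def pvSectionsB : List (List Char) → List (List Char × List (List Char))
  | [] => []
  | l :: ls =>
      (l, ls.takeWhile (fun x => !pvIsTitle x)) :: pvSectionsB (ls.dropWhile (fun x => !pvIsTitle x))
  termination_by ls => ls.length
  decreasing_by
    have := List.length_dropWhile_le (fun x => !pvIsTitle x) ls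
    simp; omega

def parse_opus_cards_alt (text : String) : String :=
  let lines := (PySem.Chars.splitOn (PySem.Chars.strip text.toList) "\n".toList).map pvNormB
  let lines := lines.filter (fun l => !(l.isEmpty || l == "---".toList))
  -- 'start = first TITLE index (or len); lines[start:]' = dropWhile non-title (exact)
  let tail := lines.dropWhile (fun l => !pvIsTitle l)
  let cards := (pvSectionsB tail).map (fun s => pvCardB s.1 s.2)
  let cards := cards.filter (fun c => !c.1.isEmpty)
  String.ofList (PySem.Chars.join [] ((PySem.List.enumerate cards).map
    (fun ic =>
      pvTpl ((PySem.List.pyGet? pvColors (PySem.Int.mod ic.1 (pvColors.length : Int))).getD [])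
        ic.2.1 ic.2.2)))

-- ===== PRECONDITION & SPEC =====
def Spec_parse_opus_cards (text : String) (out : String) : Prop := out = parse_opus_cards_alt text
instance (text : String) (out : String) : Decidable (Spec_parse_opus_cards text out) := by unfold Spec_parse_opus_cards; infer_instance

-- ===== CLAIM (what is proved, stated in full; the proofs are below) =====
def Claim_equal_parse_opus_cards : Prop := ∀ (text : String), Dom_parse_opus_cards text → Spec_parse_opus_cards text (parse_opus_cards text)

-- ===== LEMMAS AND PROOFS =====

-- A's step on a raw line = normalize, skip empty/'---', else act on the normalized line
def pvStep' (s : pvStateA) (line : List Char) : pvStateA :=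
  if pvIsTitle line then
    (pvFlushA s.1 s.2.1 s.2.2, some (pvNormB (PySem.List.slice line (some 6) none)), [])
  else if pvIsBody line then
    (s.1, s.2.1, s.2.2 ++ [PySem.Chars.strip (PySem.List.slice line (some 5) none)])
  else
    match s.2.1 with
    | some ct =>
        if ct ≠ [] ∧ ¬ (pvIsDaily line = true) ∧ 10 < line.length
        then (s.1, s.2.1, s.2.2 ++ [line]) else s
    | none => s

lemma pvStepA_eq (s : pvStateA) (raw : List Char) :
    pvStepA s raw =
      if !((pvNormB raw).isEmpty || pvNormB raw == "---".toList) then pvStep' s (pvNormB raw) else s := by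
  simp [pvStepA, pvStep', pvNormB, pvIsTitle, pvIsBody, pvIsDaily]
  split_ifs <;> simp_all

-- ''.join(parts) is the concatenation of the parts
lemma pvJoinNil : ∀ (xs : List (List Char)), PySem.Chars.join [] xs = xs.flatten
  | [] => PySem.Chars.join_nil []
  | [a] => by simp [PySem.Chars.join_singleton]
  | a :: b :: r => by
      rw [PySem.Chars.join_cons_cons]
      simp [pvJoinNil (b :: r)]

-- folding A's per-line step over the raw lines = folding the clean step over the normalized, kept lines
lemma pvFoldNorm (raws : List (List Char)) : ∀ (s0 : pvStateA),
    raws.foldl pvStepA s0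
      = ((raws.map pvNormB).filter (fun l => !(l.isEmpty || l == "---".toList))).foldl pvStep' s0 := by
  induction raws with
  | nil => intro s0; rfl
  | cons r rs ih =>
      intro s0
      rw [List.foldl_cons, pvStepA_eq, ih, List.map_cons, List.filter_cons]
      by_cases hc : (!((pvNormB r).isEmpty || pvNormB r == "---".toList)) = true
      · rw [if_pos hc, if_pos hc, List.foldl_cons]
      · rw [if_neg hc, if_neg hc]

-- the grouped reading of A's loop from an open section (title ct, pieces cb so far)
set_option maxHeartbeats 1000000 in
lemma pvL2 (M : List (List Char)) : ∀ (cards : List (List Char × List Char)) (ct : List Char) (cb : List (List Char)),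
    pvFlushA (M.foldl pvStep' (cards, some ct, cb)).1 (M.foldl pvStep' (cards, some ct, cb)).2.1
        (M.foldl pvStep' (cards, some ct, cb)).2.2
      = cards ++ (((ct, PySem.Chars.join " ".toList (cb ++ (M.takeWhile (fun x => !pvIsTitle x)).filterMap (pvPiece ct)))
            :: (pvSectionsB (M.dropWhile (fun x => !pvIsTitle x))).map (fun s => pvCardB s.1 s.2)).filter
              (fun c => !c.1.isEmpty)) := by
  induction M with
  | nil =>
      intro cards ct cb
      simp only [List.foldl_nil, List.takeWhile_nil, List.dropWhile_nil, List.filterMap_nil,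
        List.append_nil, pvSectionsB, List.map_nil, List.filter_cons, List.filter_nil]
      by_cases hct : ct = [] <;> simp [pvFlushA, hct]
  | cons l M ih =>
      intro cards ct cb
      by_cases ht : pvIsTitle l
      · have hstep : pvStep' (cards, some ct, cb) l
            = (pvFlushA cards (some ct) cb, some (pvNormB (PySem.List.slice l (some 6) none)), []) := by
          simp only [pvStep']
          rw [if_pos ht]
        have hdrop : (l :: M).dropWhile (fun x => !pvIsTitle x) = l :: M := by
          simp [ht]
        have htake : (l :: M).takeWhile (fun x => !pvIsTitle x) = [] := by
          simp [ht]
        rw [List.foldl_cons, hstep, ih, hdrop, htake, pvSectionsB]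
        simp only [List.map_cons, List.filter_cons, List.filterMap_nil, List.append_nil,
          List.nil_append, pvCardB]
        by_cases hct : ct = [] <;>
          simp [pvFlushA, hct, List.append_assoc]
      · have hstep : pvStep' (cards, some ct, cb) l = (cards, some ct, cb ++ (pvPiece ct l).toList) := by
          simp only [pvStep', pvPiece]
          rw [if_neg ht]
          by_cases hb : pvIsBody l
          · simp [hb]
          · simp only [hb, Bool.false_eq_true, if_false]
            split_ifs <;> simp_all
        have hdrop : (l :: M).dropWhile (fun x => !pvIsTitle x) = M.dropWhile (fun x => !pvIsTitle x) := by
          simp [ht]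
        have htake : (l :: M).takeWhile (fun x => !pvIsTitle x) = l :: M.takeWhile (fun x => !pvIsTitle x) := by
          simp [ht]
        rw [List.foldl_cons, hstep, ih, hdrop, htake]
        have hfm : (l :: M.takeWhile (fun x => !pvIsTitle x)).filterMap (pvPiece ct)
            = (pvPiece ct l).toList ++ (M.takeWhile (fun x => !pvIsTitle x)).filterMap (pvPiece ct) := by
          cases h : pvPiece ct l <;> simp [h]
        rw [hfm, List.append_assoc]

-- A's loop before the first TITLE line only discards input
set_option maxHeartbeats 1000000 in
lemma pvL1 (M : List (List Char)) : ∀ (b : List (List Char)),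
    pvFlushA (M.foldl pvStep' ([], none, b)).1 (M.foldl pvStep' ([], none, b)).2.1
        (M.foldl pvStep' ([], none, b)).2.2
      = ((pvSectionsB (M.dropWhile (fun x => !pvIsTitle x))).map (fun s => pvCardB s.1 s.2)).filter
          (fun c => !c.1.isEmpty) := by
  induction M with
  | nil => intro b; simp [pvFlushA, pvSectionsB]
  | cons l M ih =>
      intro b
      by_cases ht : pvIsTitle l
      · have hstep : pvStep' ([], none, b) l
            = (([] : List (List Char × List Char)), some (pvNormB (PySem.List.slice l (some 6) none)), []) := by
          simp only [pvStep']
          rw [if_pos ht]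
          rfl
        have hdrop : (l :: M).dropWhile (fun x => !pvIsTitle x) = l :: M := by
          simp [ht]
        rw [List.foldl_cons, hstep, pvL2, hdrop, pvSectionsB]
        simp [pvCardB]
      · have hstep : pvStep' ([], none, b) l
            = (([] : List (List Char × List Char)), none, b ++ (pvPiece [] l).toList) := by
          simp only [pvStep', pvPiece]
          rw [if_neg ht]
          by_cases hb : pvIsBody l
          · simp [hb]
          · simp [hb]
        have hdrop : (l :: M).dropWhile (fun x => !pvIsTitle x) = M.dropWhile (fun x => !pvIsTitle x) := by
          simp [ht]
        rw [List.foldl_cons, hstep, hdrop]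
        exact ih _

-- ===== VERDICT (by name: the statement is the Claim_ definition above) =====
set_option maxHeartbeats 1000000 in
theorem parse_opus_cards_spec : Claim_equal_parse_opus_cards := by
  intro text _
  unfold Spec_parse_opus_cards
  by_cases h : text.toList = []
  · simp only [parse_opus_cards, parse_opus_cards_alt, h, reduceIte]
    have hlines : ((PySem.Chars.splitOn (PySem.Chars.strip ([] : List Char)) "\n".toList).map pvNormB).filter
        (fun l => !(l.isEmpty || l == "---".toList)) = [] := by decide
    rw [hlines]
    simp only [List.dropWhile_nil, pvSectionsB, List.map_nil, List.filter_nil,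
      PySem.List.enumerate_nil, PySem.Chars.join_nil]
  · simp only [parse_opus_cards, parse_opus_cards_alt, if_neg h]
    apply congrArg
    rw [pvFoldNorm, pvL1, PySem.List.foldl_append_eq_flatMap, pvJoinNil, List.flatMap_def, List.nil_append]
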